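-- pv_equiv track=rewrite | github.com/Leyandre/Metro_project | main.py | make_dic_liaisons
-- ===== SOURCE A (Python) =====
-- def make_dic_liaisons(dic_station):
--     liaisons = {}
--
--     for station in dic_station:
--
--         if (dic_station[station][0] in liaisons):
--             liaisons[dic_station[station][0]].append(station)
--         else:
--             liaisons[dic_station[station][0]] = [station]
--
--     change_size = 1
--
--     while change_size:
--         change_size = 0
--
--         for liaison in liaisons:
--
--             if len(liaisons[liaison]) == 1:
--
--                 del liaisons[liaison]
--                 change_size = 1
--                 break
--
--     return liaisons
-- ===== SOURCE B (Python) =====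
-- def make_dic_liaisons(dic_station):
--     # One pass to count stations per connection key, one pass to build only
--     # the non-singleton groups; no build-then-delete loop.
--     pairs = [(dic_station[station][0], station) for station in dic_station]
--
--     counts = {}
--     for key, _station in pairs:
--         counts[key] = counts.get(key, 0) + 1
--
--     liaisons = {}
--     for key, station in pairs:
--         if counts[key] > 1:
--             liaisons.setdefault(key, []).append(station)
--
--     return liaisons
-- ===== Notes on version B (the rewrite author's own statement) =====
-- stated objective: alternative
-- what changed: A builds all groups and then repeatedly rescans the dict deleting one singleton group per pass; B counts stations per connection key in a first pass and in a second pass inserts only stations whose key count exceeds 1, so singleton groups are never created and no deletion loop is needed.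
import Mathlib
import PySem

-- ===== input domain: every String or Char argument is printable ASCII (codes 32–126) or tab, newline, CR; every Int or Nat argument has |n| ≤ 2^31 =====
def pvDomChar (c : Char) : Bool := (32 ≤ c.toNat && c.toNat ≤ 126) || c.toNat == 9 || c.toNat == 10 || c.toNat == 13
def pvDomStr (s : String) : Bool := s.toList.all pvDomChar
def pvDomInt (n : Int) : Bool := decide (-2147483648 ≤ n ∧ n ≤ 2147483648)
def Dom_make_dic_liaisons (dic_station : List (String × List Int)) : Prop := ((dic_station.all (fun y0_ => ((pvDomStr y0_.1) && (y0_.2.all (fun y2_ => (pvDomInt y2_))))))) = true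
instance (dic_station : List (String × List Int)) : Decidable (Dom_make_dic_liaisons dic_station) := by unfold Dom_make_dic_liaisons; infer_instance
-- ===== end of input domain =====

-- B replaces A's build-all-groups-then-delete-singletons loop by a counting pass
-- followed by a pass that only ever inserts stations of non-singleton keys.

-- ===== PORT A =====
-- A's `while change_size:` loop: each pass scans the dict, deletes the FIRST
-- group of length 1 it finds and restarts; it stops on a pass with no deletion.
def removeSingles (d : PySem.Dict Int (List String)) : PySem.Dict Int (List String) :=
  match h : d.items.find? (fun q => q.2.length == 1) with
  | none => d
  | some q => removeSingles (d.erase q.1)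
termination_by d.items.length
decreasing_by
  have hmem : q ∈ d.items := List.mem_of_find?_eq_some h
  simp only [PySem.Dict.erase]
  exact List.length_filter_lt_length_iff_exists.2 ⟨q, hmem, by simp⟩

def make_dic_liaisons (dic_station : List (String × List Int)) : List (Int × List String) :=
  let liaisons := dic_station.foldl (fun d p =>
    let k := PySem.List.pyGetD p.2 0 0
    if d.contains k then d.modify k [] (· ++ [p.1]) else d.insert k [p.1])
    PySem.Dict.empty
  (removeSingles liaisons).items

-- ===== PORT B =====
def make_dic_liaisons_alt (dic_station : List (String × List Int)) : List (Int × List String) :=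
  let pairs := dic_station.map (fun p => (PySem.List.pyGetD p.2 0 0, p.1))
  let counts := pairs.foldl (fun d q => d.insert q.1 (d.getD q.1 0 + 1)) PySem.Dict.empty
  let liaisons := pairs.foldl
    (fun d q => if (counts.getD q.1 0) > (1:Int) then d.modify q.1 [] (· ++ [q.2]) else d)
    PySem.Dict.empty
  liaisons.items

-- ===== PRECONDITION & SPEC =====
-- Pre_ excludes stations whose connection list is empty (A raises IndexError on
-- dic_station[station][0]) and duplicate station keys, which a Python dict cannot hold.
def Pre_make_dic_liaisons (dic_station : List (String × List Int)) : Prop :=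
  (dic_station.map Prod.fst).Nodup ∧ ∀ p ∈ dic_station, p.2 ≠ []
instance (dic_station : List (String × List Int)) : Decidable (Pre_make_dic_liaisons dic_station) := by unfold Pre_make_dic_liaisons; infer_instance

def pvWitness_make_dic_liaisons : (List (String × List Int)) :=
  [("a", [1]), ("b", [1]), ("c", [2])]

def Spec_make_dic_liaisons (dic_station : List (String × List Int)) (out : List (Int × List String)) : Prop := out = make_dic_liaisons_alt dic_station
instance (dic_station : List (String × List Int)) (out : List (Int × List String)) : Decidable (Spec_make_dic_liaisons dic_station out) := by unfold Spec_make_dic_liaisons; infer_instance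

-- ===== CLAIM (what is proved, stated in full; the proofs are below) =====
def Claim_equal_make_dic_liaisons : Prop := ∀ (dic_station : List (String × List Int)), Dom_make_dic_liaisons dic_station → Pre_make_dic_liaisons dic_station → Spec_make_dic_liaisons dic_station (make_dic_liaisons dic_station)

-- ===== LEMMAS AND PROOFS =====

theorem removeSingles_items (d : PySem.Dict Int (List String)) (hnd : d.keys.Nodup) :
    (removeSingles d).items = d.items.filter (fun q => !(q.2.length == 1)) := by
  fun_induction removeSingles d with
  | case1 d h =>
    rw [List.filter_eq_self.mpr]
    intro x hx
    simp [List.find?_eq_none.mp h x hx]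
  | case2 d q h ih =>
    have hmem : q ∈ d.items := List.mem_of_find?_eq_some h
    have hq1 : q.2.length = 1 := by simpa using List.find?_some h
    have hkeys : d.keys = d.items.map Prod.fst := rfl
    have hnd' : (d.erase q.1).keys.Nodup := by
      have : (d.erase q.1).keys.Sublist d.keys := by
        simp only [PySem.Dict.erase, hkeys]
        exact List.filter_sublist.map Prod.fst
      exact hnd.sublist this
    rw [ih hnd']
    simp only [PySem.Dict.erase, List.filter_filter]
    apply List.filter_congr
    intro x hx
    by_cases hlen : x.2.length = 1
    · simp [hlen]
    · have hne : x.1 ≠ q.1 := by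
        intro hk
        have : x = q := List.inj_on_of_nodup_map (hkeys ▸ hnd) hx hmem hk
        exact hlen (this ▸ hq1)
      simp [hlen, hne]

theorem foldl_add_filter {α : Type} [BEq α] [LawfulBEq α] (q : α → Bool) (ys : List α) :
    ∀ s : List α, (ys.foldl PySem.Set.add s).filter q = (ys.filter q).foldl PySem.Set.add (s.filter q) := by
  induction ys with
  | nil => intro s; simp
  | cons y ys ih =>
    intro s
    have hstep : (PySem.Set.add s y).filter q =
        if q y = true then PySem.Set.add (s.filter q) y else s.filter q := by
      by_cases hq : q y = true <;> by_cases hm : y ∈ s <;>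
        simp [PySem.Set.add, hm, hq, List.filter_append]
    simp only [List.foldl_cons, List.filter_cons]
    rw [ih, hstep]
    by_cases hq : q y = true <;> simp [hq]

theorem ofList_filter {α : Type} [BEq α] [LawfulBEq α] (q : α → Bool) (ys : List α) :
    PySem.Set.ofList (ys.filter q) = (PySem.Set.ofList ys).filter q := by
  rw [PySem.Set.ofList, PySem.Set.ofList, foldl_add_filter]
  rfl

def pvPairs (l : List (String × List Int)) : List (Int × String) :=
  l.map (fun p => (PySem.List.pyGetD p.2 0 0, p.1))

def pvCounts (l : List (String × List Int)) : PySem.Dict Int Int :=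
  (pvPairs l).foldl (fun d q => d.insert q.1 (d.getD q.1 0 + 1)) PySem.Dict.empty

def pvQ (l : List (String × List Int)) (k : Int) : Bool :=
  decide ((pvCounts l).getD k 0 > (1:Int))

def pvGstep (d : PySem.Dict Int (List String)) (q : Int × String) : PySem.Dict Int (List String) :=
  d.modify q.1 [] (· ++ [q.2])

def pvG (l : List (String × List Int)) : PySem.Dict Int (List String) :=
  (pvPairs l).foldl pvGstep PySem.Dict.empty

def pvH (l : List (String × List Int)) : PySem.Dict Int (List String) :=
  ((pvPairs l).filter (fun x => pvQ l x.1)).foldl pvGstep PySem.Dict.empty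

def pvGrp (l : List (String × List Int)) (k : Int) : List String :=
  ((pvPairs l).filter (fun x => x.1 == k)).map (fun x => x.2)

def pvKeyList (l : List (String × List Int)) : List Int := (pvPairs l).map (fun q => q.1)

theorem counts_getD (l : List (String × List Int)) (k : Int) :
    (pvCounts l).getD k 0 = ((pvKeyList l).count k : Int) := by
  have h1 : (pvKeyList l).foldl
      (fun d x => d.insert x (d.getD x 0 + 1)) PySem.Dict.empty = pvCounts l := by
    rw [pvCounts, pvKeyList, List.foldl_map]
  rw [← h1, PySem.Dict.getD_foldl_insert_add_one]
  simp

theorem A_fold_eq (l : List (String × List Int)) :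
    l.foldl (fun d p =>
      let k := PySem.List.pyGetD p.2 0 0
      if d.contains k then d.modify k [] (· ++ [p.1]) else d.insert k [p.1])
      PySem.Dict.empty = pvG l := by
  rw [pvG, pvPairs, List.foldl_map]
  congr 1
  funext d p
  by_cases hc : d.contains (PySem.List.pyGetD p.2 0 0) = true
  · simp [pvGstep, hc]
  · have hc' : d.contains (PySem.List.pyGetD p.2 0 0) = false := by simpa using hc
    simp [pvGstep, hc, PySem.Dict.modify, PySem.Dict.getD_of_not_contains d [] hc']

theorem G_keys (l : List (String × List Int)) : (pvG l).keys = PySem.Set.ofList (pvKeyList l) := by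
  show (List.foldl (fun d q => d.modify q.1 [] (· ++ [q.2])) PySem.Dict.empty (pvPairs l)).keys = _
  rw [PySem.Dict.keys_foldl_modify_key (pvPairs l) (fun q : Int × String => q.1)
      ([] : List String) (fun _ q => (fun v => v ++ [q.2])), PySem.Dict.keys_empty]
  rfl

theorem G_nodup (l : List (String × List Int)) : (pvG l).keys.Nodup := by
  show (List.foldl (fun d q => d.modify q.1 [] (· ++ [q.2])) PySem.Dict.empty (pvPairs l)).keys.Nodup
  exact PySem.Dict.nodup_keys_foldl_modify_key (pvPairs l) (fun q : Int × String => q.1)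
    ([] : List String) (fun _ q => (fun v => v ++ [q.2])) PySem.Dict.empty (by simp)

theorem G_getD (l : List (String × List Int)) (k : Int) : (pvG l).getD k [] = pvGrp l k := by
  show (List.foldl (fun d q => d.modify q.1 [] (· ++ [q.2])) PySem.Dict.empty (pvPairs l)).getD k [] = _
  rw [PySem.Dict.getD_foldl_modify_append (pvPairs l) PySem.Dict.empty k]
  simp [pvGrp]

theorem H_keys (l : List (String × List Int)) :
    (pvH l).keys = (PySem.Set.ofList (pvKeyList l)).filter (pvQ l) := by
  show (List.foldl (fun d q => d.modify q.1 [] (· ++ [q.2])) PySem.Dict.empty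
      ((pvPairs l).filter (fun x => pvQ l x.1))).keys = _
  rw [PySem.Dict.keys_foldl_modify_key ((pvPairs l).filter (fun x => pvQ l x.1))
      (fun q : Int × String => q.1) ([] : List String) (fun _ q => (fun v => v ++ [q.2])),
      PySem.Dict.keys_empty]
  have hmap : ((pvPairs l).filter (fun x => pvQ l x.1)).map (fun q : Int × String => q.1)
      = (pvKeyList l).filter (pvQ l) := by
    rw [pvKeyList, List.filter_map]
    rfl
  show PySem.Set.ofList (((pvPairs l).filter (fun x => pvQ l x.1)).map (fun q : Int × String => q.1)) = _
  rw [hmap, ofList_filter]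

theorem H_nodup (l : List (String × List Int)) : (pvH l).keys.Nodup := by
  show (List.foldl (fun d q => d.modify q.1 [] (· ++ [q.2])) PySem.Dict.empty
      ((pvPairs l).filter (fun x => pvQ l x.1))).keys.Nodup
  exact PySem.Dict.nodup_keys_foldl_modify_key _ (fun q : Int × String => q.1)
    ([] : List String) (fun _ q => (fun v => v ++ [q.2])) PySem.Dict.empty (by simp)

theorem H_getD (l : List (String × List Int)) (k : Int) (hk : pvQ l k = true) :
    (pvH l).getD k [] = pvGrp l k := by
  show (List.foldl (fun d q => d.modify q.1 [] (· ++ [q.2])) PySem.Dict.empty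
      ((pvPairs l).filter (fun x => pvQ l x.1))).getD k [] = _
  rw [PySem.Dict.getD_foldl_modify_append _ PySem.Dict.empty k]
  have hcollapse : ((pvPairs l).filter (fun x => pvQ l x.1)).filter (fun p => p.1 == k)
      = (pvPairs l).filter (fun p => p.1 == k) := by
    rw [List.filter_filter]
    apply List.filter_congr
    intro x _
    by_cases hxk : (x.1 == k) = true
    · have hx1 : x.1 = k := by simpa using hxk
      simp [hx1, hk]
    · simp [hxk]
  rw [hcollapse]
  simp [pvGrp]

theorem grp_len (l : List (String × List Int)) (k : Int) :
    (pvGrp l k).length = (pvKeyList l).count k := by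
  rw [pvGrp, List.length_map, pvKeyList, List.count_eq_countP, List.countP_map,
    List.countP_eq_length_filter]
  rfl

theorem main_eq (l : List (String × List Int)) :
    make_dic_liaisons l = make_dic_liaisons_alt l := by
  have hA : make_dic_liaisons l
      = ((PySem.Set.ofList (pvKeyList l)).filter (pvQ l)).map (fun k => (k, pvGrp l k)) := by
    show (removeSingles (l.foldl (fun d p =>
      let k := PySem.List.pyGetD p.2 0 0
      if d.contains k then d.modify k [] (· ++ [p.1]) else d.insert k [p.1])
      PySem.Dict.empty)).items = _
    rw [A_fold_eq, removeSingles_items _ (G_nodup l),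
      PySem.Dict.items_eq_map_keys _ (G_nodup l) [], G_keys]
    have hfun : (fun k : Int => (k, (pvG l).getD k [])) = (fun k : Int => (k, pvGrp l k)) :=
      funext (fun k => by rw [G_getD])
    rw [hfun, List.filter_map]
    congr 1
    apply List.filter_congr
    intro k hk
    have hpos : 1 ≤ (pvKeyList l).count k :=
      List.count_pos_iff.mpr ((PySem.Set.mem_ofList _ _).mp hk)
    show (!((pvGrp l k).length == 1)) = pvQ l k
    rw [grp_len, pvQ, counts_getD]
    rcases eq_or_lt_of_le hpos with h|h
    · simp [← h]
    · have h1 : ((pvKeyList l).count k == 1) = false := by simp; omega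
      have h2 : ((1:Int) < ((pvKeyList l).count k : Int)) := by exact_mod_cast h
      simp [h1, h2]
  have hB : make_dic_liaisons_alt l
      = ((PySem.Set.ofList (pvKeyList l)).filter (pvQ l)).map (fun k => (k, pvGrp l k)) := by
    show (List.foldl (fun d q => if ((pvCounts l).getD q.1 0) > (1:Int)
        then d.modify q.1 [] (· ++ [q.2]) else d) PySem.Dict.empty (pvPairs l)).items = _
    have hfold : (List.foldl (fun d q => if ((pvCounts l).getD q.1 0) > (1:Int)
        then d.modify q.1 [] (· ++ [q.2]) else d) PySem.Dict.empty (pvPairs l)) = pvH l := by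
      rw [pvH]
      show _ = List.foldl (fun d q => d.modify q.1 [] (· ++ [q.2])) PySem.Dict.empty
        ((pvPairs l).filter (fun x => pvQ l x.1))
      rw [List.foldl_filter]
      simp only [pvQ, decide_eq_true_eq]
    rw [hfold, PySem.Dict.items_eq_map_keys _ (H_nodup l) [], H_keys]
    apply List.map_congr_left
    intro k hk
    have hkq : pvQ l k = true := (List.mem_filter.mp hk).2
    rw [H_getD l k hkq]
  rw [hA, hB]

-- ===== VERDICT (by name: the statement is the Claim_ definition above) =====
theorem make_dic_liaisons_spec : Claim_equal_make_dic_liaisons := by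
  intro l _ _
  unfold Spec_make_dic_liaisons
  exact main_eq l
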